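-- pv_equiv track=rewrite | github.com/raeez/chiral-bar-cobar | compute/lib/moonshine_arithmetic_deep_engine.py | multiplicative_structure_j
-- ===== SOURCE A (Python) =====
-- from typing import Any, Dict, List, Optional, Tuple
--
-- J_COEFFS: Dict[int, int] = {
--     -1: 1,
--     0: 0,
--     1: 196884,
--     2: 21493760,
--     3: 864299970,
--     4: 20245856256,
--     5: 333202640600,
--     6: 4252023300096,
--     7: 44656994071935,
--     8: 401490886656000,
--     9: 3176440229784420,
--     10: 22567393309593600,
--     11: 146211911499519294,
--     12: 874313719685775360,
--     13: 4872010111798142520,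
--     14: 25497827389410525184,
--     15: 126142916465781843075,
--     16: 593121772421445603328,
--     17: 2662842413150775245160,
--     18: 11459912788444786513920,
--     19: 47438786801234168813780,
--     20: 189449976248893390028800,
-- }
--
-- def j_coefficient(n: int) -> int:
--     """Coefficient c(n) of J(tau) = j(tau) - 744 = sum_{n>=-1} c(n) q^n.
--
--     Returns the coefficient of q^n in J(tau).
--     Tabulated for n in [-1, 20].
--     """
--     if n in J_COEFFS:
--         return J_COEFFS[n]
--     raise ValueError(f"J-coefficient at n={n} not tabulated; available: [-1, 20]")
--
-- def divisor_sum_j(n: int) -> int: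
--     r"""Compute sum_{d|n} d * c(n/d) for the multiplicative structure.
--
--     This is related to the Hecke image T_n(J) at q^1:
--         T_n(J)|_{q^1} = sum_{d|gcd(n,1)} d * c(n/d^2)
--                        = c(n)  [since gcd(n,1)=1, only d=1]
--     """
--     total = 0
--     for d in range(1, n + 1):
--         if n % d == 0:
--             q = n // d
--             if q in J_COEFFS:
--                 total += d * J_COEFFS[q]
--     return total
--
-- def multiplicative_structure_j(max_n: int = 10) -> Dict[int, Dict[str, int]]:
--     """Divisor-sum structure of J-function coefficients."""
--     result = {}
--     for n in range(1, max_n + 1):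
--         sigma = divisor_sum_j(n)
--         result[n] = {
--             'c(n)': j_coefficient(n),
--             'divisor_sum': sigma,
--             'ratio': sigma // j_coefficient(n) if j_coefficient(n) != 0 else None,
--         }
--     return result
-- ===== SOURCE B (Python) =====
-- J_COEFFS = {
--     -1: 1,
--     0: 0,
--     1: 196884,
--     2: 21493760,
--     3: 864299970,
--     4: 20245856256,
--     5: 333202640600,
--     6: 4252023300096,
--     7: 44656994071935,
--     8: 401490886656000,
--     9: 3176440229784420,
--     10: 22567393309593600,
--     11: 146211911499519294,
--     12: 874313719685775360,
--     13: 4872010111798142520,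
--     14: 25497827389410525184,
--     15: 126142916465781843075,
--     16: 593121772421445603328,
--     17: 2662842413150775245160,
--     18: 11459912788444786513920,
--     19: 47438786801234168813780,
--     20: 189449976248893390028800,
-- }
--
-- def multiplicative_structure_j(max_n: int = 10):
--     """Divisor-sum structure of J-function coefficients (sieve version)."""
--     # Sieve: scatter d * c(q) onto every multiple d*q <= max_n.
--     sigma = {}
--     for d in range(1, max_n + 1):
--         for q in range(1, max_n // d + 1):
--             if q in J_COEFFS:
--                 sigma[d * q] = sigma.get(d * q, 0) + d * J_COEFFS[q]
--     result = {}
--     for n in range(1, max_n + 1):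
--         c = J_COEFFS[n]
--         s = sigma.get(n, 0)
--         result[n] = {'c(n)': c, 'divisor_sum': s, 'ratio': s // c if c != 0 else None}
--     return result
-- ===== Notes on version B (the rewrite author's own statement) =====
-- stated objective: alternative
-- what changed: Replaces the per-n divisor rescan (for each n, loop d=1..n testing n % d == 0) with a sieve that scatters d*c(q) onto each multiple d*q <= max_n in one double loop, then a second pass assembles the table from the precomputed sums.
import Mathlib
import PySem

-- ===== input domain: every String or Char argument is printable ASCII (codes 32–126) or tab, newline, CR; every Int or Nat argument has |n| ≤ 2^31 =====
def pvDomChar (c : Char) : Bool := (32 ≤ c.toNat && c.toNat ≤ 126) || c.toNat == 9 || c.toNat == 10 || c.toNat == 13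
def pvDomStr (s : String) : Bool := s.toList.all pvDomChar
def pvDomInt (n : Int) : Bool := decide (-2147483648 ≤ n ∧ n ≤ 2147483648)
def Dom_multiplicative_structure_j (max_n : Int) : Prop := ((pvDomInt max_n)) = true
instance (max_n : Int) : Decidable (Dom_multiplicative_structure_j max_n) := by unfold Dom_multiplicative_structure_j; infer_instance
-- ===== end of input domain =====

-- B replaces A's per-n divisor rescan with a sieve scattering d*c(q) onto multiples, then a
-- separate assembly pass (alternative decomposition; inputs capped at 20 are too small to time).

-- ===== PORT A =====
def J_COEFFS : PySem.Dict Int Int := PySem.Dict.ofList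
  [(-1, 1), (0, 0), (1, 196884), (2, 21493760), (3, 864299970), (4, 20245856256),
   (5, 333202640600), (6, 4252023300096), (7, 44656994071935), (8, 401490886656000),
   (9, 3176440229784420), (10, 22567393309593600), (11, 146211911499519294),
   (12, 874313719685775360), (13, 4872010111798142520), (14, 25497827389410525184),
   (15, 126142916465781843075), (16, 593121772421445603328), (17, 2662842413150775245160),
   (18, 11459912788444786513920), (19, 47438786801234168813780), (20, 189449976248893390028800)]

-- j_coefficient raises ValueError when n is not tabulated; Pre_ excludes that, so the
-- 'raise' branch is ported as a default that is never reached inside Pre_.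
def j_coefficient (n : Int) : Int :=
  if J_COEFFS.contains n then J_COEFFS.getD n 0 else 0

def divisor_sum_j (n : Int) : Int :=
  (PySem.List.pyRange 1 (n + 1) 1).foldl
    (fun total d =>
      if PySem.Int.mod n d == 0 then
        let q := PySem.Int.floordiv n d
        if J_COEFFS.contains q then total + d * J_COEFFS.getD q 0 else total
      else total) 0

def multiplicative_structure_j (max_n : Int) : List (Int × List (String × Option Int)) :=
  (PySem.List.pyRange 1 (max_n + 1) 1).foldl
    (fun result n =>
      let sigma := divisor_sum_j n
      result ++ [(n,
        [("c(n)", some (j_coefficient n)),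
         ("divisor_sum", some sigma),
         ("ratio", if j_coefficient n ≠ 0 then some (PySem.Int.floordiv sigma (j_coefficient n)) else none)])])
    []

-- ===== PORT B =====
def msj_sieve (max_n : Int) : PySem.Dict Int Int :=
  (PySem.List.pyRange 1 (max_n + 1) 1).foldl
    (fun sigma d =>
      (PySem.List.pyRange 1 (PySem.Int.floordiv max_n d + 1) 1).foldl
        (fun sigma q =>
          if J_COEFFS.contains q then
            sigma.insert (d * q) (sigma.getD (d * q) 0 + d * J_COEFFS.getD q 0)
          else sigma) sigma)
    PySem.Dict.empty

def multiplicative_structure_j_alt (max_n : Int) : List (Int × List (String × Option Int)) :=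
  let sigma := msj_sieve max_n
  (PySem.List.pyRange 1 (max_n + 1) 1).foldl
    (fun result n =>
      let c := J_COEFFS.getD n 0   -- J_COEFFS[n]; a missing key (KeyError) is excluded by Pre_
      let s := sigma.getD n 0
      result ++ [(n,
        [("c(n)", some c),
         ("divisor_sum", some s),
         ("ratio", if c ≠ 0 then some (PySem.Int.floordiv s c) else none)])])
    []

-- ===== PRECONDITION & SPEC =====
-- Pre_ excludes max_n beyond the tabulated coefficient range, where A raises ValueError
-- (in j_coefficient) and B raises KeyError; neither returns there.
def Pre_multiplicative_structure_j (max_n : Int) : Prop := max_n ≤ 20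
instance (max_n : Int) : Decidable (Pre_multiplicative_structure_j max_n) := by unfold Pre_multiplicative_structure_j; infer_instance
def pvWitness_multiplicative_structure_j : Int := (10)

def Spec_multiplicative_structure_j (max_n : Int) (out : List (Int × List (String × Option Int))) : Prop := out = multiplicative_structure_j_alt max_n
instance (max_n : Int) (out : List (Int × List (String × Option Int))) : Decidable (Spec_multiplicative_structure_j max_n out) := by unfold Spec_multiplicative_structure_j; infer_instance

-- ===== CLAIM (what is proved, stated in full; the proofs are below) =====
def Claim_equal_multiplicative_structure_j : Prop := ∀ (max_n : Int), Dom_multiplicative_structure_j max_n → Pre_multiplicative_structure_j max_n → Spec_multiplicative_structure_j max_n (multiplicative_structure_j max_n)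

-- ===== LEMMAS AND PROOFS =====

theorem msj_empty_of_nonpos (max_n : Int) (h : max_n ≤ 0) :
    multiplicative_structure_j max_n = [] ∧ multiplicative_structure_j_alt max_n = [] := by
  have hr : PySem.List.pyRange 1 (max_n + 1) 1 = [] := by
    rw [PySem.List.pyRange_one]
    simp only [List.map_eq_nil_iff, List.range_eq_nil]
    omega
  constructor <;> simp [multiplicative_structure_j, multiplicative_structure_j_alt, hr]

-- ===== VERDICT (by name: the statement is the Claim_ definition above) =====
set_option maxRecDepth 10000 in
theorem multiplicative_structure_j_spec : Claim_equal_multiplicative_structure_j := by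
  intro max_n _ hpre
  unfold Spec_multiplicative_structure_j
  by_cases hle : max_n ≤ 0
  · have h := msj_empty_of_nonpos max_n hle
    rw [h.1, h.2]
  · have h1 : 1 ≤ max_n := by omega
    have h20 : max_n ≤ 20 := hpre
    interval_cases max_n <;> decide
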